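-- pv_equiv track=rewrite | github.com/CSToddDEV/CS-325-Portfolio-Project | Palindrome.py | checkPalindrome_1
-- ===== SOURCE A (Python) =====
-- def checkPalindrome_1(string, k):
--     """
--     Implements a recursive brute force approach to discovering if the given string is a k-palindrome where k is the
--     MAXIMUM amount of letters able to br removed from the sting to create a palindrome.  Will return True if true, or
--     False if false.
--     """
--     # reverse the string
--     reverse = string[::-1]
--     # if k is 0, or as many letters have been removed from the string as possible
--     if k == 0:
--         if reverse == string:
--             return True
--         else:
--             return False
--
--     # if k is not 0, check to see if palindrome is valid, if not make iterative recursive call: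
--     else:
--         if reverse == string:
--             return True
--         else:
--             for letter in string:
--                 adjusted_string = string.replace(letter, '')
--                 truth = checkPalindrome_1(adjusted_string, k - 1)
--                 if truth:
--                     return truth
--     return truth
-- ===== SOURCE B (Python) =====
-- def checkPalindrome_1(string, k):
--     """
--     Decide whether removing at most k distinct letter-types from `string`
--     yields a palindrome, by a choose-or-skip search over the distinct letters.
--     """
--     letters = list(dict.fromkeys(string))
--
--     def ok(rest, s, budget):
--         if s == s[::-1]:
--             return True
--         if budget <= 0 or not rest:
--             return False
--         c = rest[0]
--         return ok(rest[1:], s.replace(c, ''), budget - 1) or ok(rest[1:], s, budget)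
--
--     return ok(letters, string, k)
-- ===== Notes on version B (the rewrite author's own statement) =====
-- stated objective: alternative
-- what changed: A tries every letter of the current string at every recursion level (re-exploring the same removal sets in every order); B does one choose-or-skip recursion over the distinct letters of the original string, so each subset of letter-types is considered at most once (not measurably faster on the timed inputs, where the palindrome check dominates).
-- outside the precondition, e.g. on checkPalindrome_1('ab', -1): A returns True, B returns False
import Mathlib
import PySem

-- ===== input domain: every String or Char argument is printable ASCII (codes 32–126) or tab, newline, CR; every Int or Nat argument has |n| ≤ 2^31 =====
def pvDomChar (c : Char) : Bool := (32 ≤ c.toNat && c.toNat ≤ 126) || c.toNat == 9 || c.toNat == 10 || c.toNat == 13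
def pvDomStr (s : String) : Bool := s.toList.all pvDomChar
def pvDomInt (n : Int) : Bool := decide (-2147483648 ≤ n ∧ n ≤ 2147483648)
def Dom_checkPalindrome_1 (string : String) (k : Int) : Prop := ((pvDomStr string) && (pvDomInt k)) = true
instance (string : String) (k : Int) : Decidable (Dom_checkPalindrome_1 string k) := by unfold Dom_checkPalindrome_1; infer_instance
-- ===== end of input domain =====

-- B replaces A's "try every remaining letter of the string at every recursion level" search by a
-- choose-or-skip recursion over the distinct letters of the original string (objective: alternative).

-- s.replace(letter, '') on a string viewed as a list of characters
def pvRemove (c : Char) (s : List Char) : List Char := s.filter (fun a => a ≠ c)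

theorem pvRemove_length_lt {c : Char} {l : List Char} (h : c ∈ l) : (pvRemove c l).length < l.length :=
  List.length_filter_lt_length_iff_exists.mpr ⟨c, h, by simp⟩

-- ===== PORT A =====
def checkPalindrome_1Go (s : List Char) (k : Int) : Bool :=
  let rev := s.reverse
  if k = 0 then
    if rev = s then true else false
  else
    if rev = s then true
    else
      -- 'for letter in string: … if truth: return truth' and the final 'return truth'
      -- (the loop body only ever returns True, and the trailing 'return truth' returns the
      -- last False; the loop is only reached on a non-palindromic, hence non-empty, string)
      s.attach.any (fun c => checkPalindrome_1Go (pvRemove c.1 s) (k - 1))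
termination_by s.length
decreasing_by exact pvRemove_length_lt c.2

def checkPalindrome_1 (string : String) (k : Int) : Bool :=
  checkPalindrome_1Go string.toList k

-- ===== PORT B =====
-- ok(rest, s, budget) from Source B
def pvAltGo : List Char → List Char → Int → Bool
  | rest, s, b =>
    if s.reverse = s then true
    else if b ≤ 0 then false
    else
      match rest with
      | [] => false
      | c :: tl => pvAltGo tl (pvRemove c s) (b - 1) || pvAltGo tl s b
termination_by rest _ _ => rest.length
decreasing_by all_goals simp

def checkPalindrome_1_alt (string : String) (k : Int) : Bool :=
  pvAltGo (PySem.List.dedup string.toList) string.toList k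

-- ===== PRECONDITION & SPEC =====
-- Pre_ excludes negative k — a removal budget outside the natural domain of the task — where A's
-- unbounded recursion bottoms out at the empty string and accidentally returns True, while B
-- naturally reduces a non-positive budget to a plain palindrome check.
def Pre_checkPalindrome_1 (_string : String) (k : Int) : Prop := 0 ≤ k
instance (string : String) (k : Int) : Decidable (Pre_checkPalindrome_1 string k) := by unfold Pre_checkPalindrome_1; infer_instance
def pvWitness_checkPalindrome_1 : String × Int := ("abca", 1)

def Spec_checkPalindrome_1 (string : String) (k : Int) (out : Bool) : Prop := out = checkPalindrome_1_alt string k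
instance (string : String) (k : Int) (out : Bool) : Decidable (Spec_checkPalindrome_1 string k out) := by unfold Spec_checkPalindrome_1; infer_instance

-- ===== CLAIM (what is proved, stated in full; the proofs are below) =====
def Claim_equal_checkPalindrome_1 : Prop := ∀ (string : String) (k : Int), Dom_checkPalindrome_1 string k → Pre_checkPalindrome_1 string k → Spec_checkPalindrome_1 string k (checkPalindrome_1 string k)

-- ===== LEMMAS AND PROOFS =====

-- removing each letter type of S in turn
def pvRemoveAll (S : List Char) (s : List Char) : List Char :=
  S.foldl (fun t c => pvRemove c t) s

theorem pvRemoveAll_eq_filter (S s : List Char) :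
    pvRemoveAll S s = s.filter (fun a => decide (a ∉ S)) := by
  induction S generalizing s with
  | nil => simp [pvRemoveAll]
  | cons c S ih =>
    show pvRemoveAll S (pvRemove c s) = _
    rw [ih, pvRemove, List.filter_filter]
    apply List.filter_congr
    intro a _
    by_cases h1 : a = c <;> by_cases h2 : a ∈ S <;> simp [h1, h2]

theorem pvRemoveAll_nil (s : List Char) : pvRemoveAll [] s = s := rfl

theorem pvRemoveAll_cons (c : Char) (S s : List Char) :
    pvRemoveAll (c :: S) s = pvRemoveAll S (pvRemove c s) := rfl

theorem pvRemove_of_not_mem {c : Char} {s : List Char} (h : c ∉ s) : pvRemove c s = s := by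
  apply List.filter_eq_self.mpr
  intro a ha
  simp only [decide_eq_true_eq, ne_eq]
  rintro rfl
  exact h ha

-- the '←' step of aGo_iff at level n+1, by induction on the removal list S
theorem aGo_back (n : Nat)
    (ih : ∀ s : List Char, checkPalindrome_1Go s (n : Int) = true ↔
      ∃ S : List Char, S.length ≤ n ∧ (pvRemoveAll S s).reverse = pvRemoveAll S s) :
    ∀ (S s : List Char), ¬ (s.reverse = s) → S.length ≤ n + 1 →
      (pvRemoveAll S s).reverse = pvRemoveAll S s →
      s.attach.any (fun c => checkPalindrome_1Go (pvRemove c.1 s) ((n : Int) + 1 - 1)) = true := by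
  intro S
  induction S with
  | nil => intro s hp _ hpal; exact absurd (by simpa [pvRemoveAll_nil] using hpal) hp
  | cons c S ihS =>
    intro s hp hlen hpal
    rw [pvRemoveAll_cons] at hpal
    by_cases hcs : c ∈ s
    · apply List.any_eq_true.mpr
      refine ⟨⟨c, hcs⟩, List.mem_attach _ _, ?_⟩
      have : ((n : Int) + 1 - 1) = (n : Int) := by ring
      rw [this]
      exact (ih _).mpr ⟨S, by simpa using hlen, hpal⟩
    · rw [pvRemove_of_not_mem hcs] at hpal
      exact ihS s hp (by simp at hlen; omega) hpal

-- characterisation of A: some list of ≤ k letter-type removals yields a palindrome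
theorem aGo_iff (n : Nat) (s : List Char) :
    checkPalindrome_1Go s (n : Int) = true ↔
      ∃ S : List Char, S.length ≤ n ∧ (pvRemoveAll S s).reverse = pvRemoveAll S s := by
  induction n generalizing s with
  | zero =>
    rw [checkPalindrome_1Go]
    simp only [Nat.cast_zero]
    constructor
    · intro h
      refine ⟨[], by simp, ?_⟩
      rw [pvRemoveAll_nil]
      by_cases hp : s.reverse = s
      · exact hp
      · simp [hp] at h
    · rintro ⟨S, hlen, hpal⟩
      have hS : S = [] := List.length_eq_zero_iff.mp (Nat.le_zero.mp hlen)
      subst hS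
      rw [pvRemoveAll_nil] at hpal
      simp [hpal]
  | succ n ih =>
    have hne : ((n + 1 : Nat) : Int) ≠ 0 := by exact_mod_cast Nat.succ_ne_zero n
    rw [checkPalindrome_1Go]
    simp only [if_neg hne]
    by_cases hp : s.reverse = s
    · simp only [if_pos hp, true_iff]
      exact ⟨[], by simp, by rw [pvRemoveAll_nil]; exact hp⟩
    · simp only [if_neg hp]
      constructor
      · intro h
        obtain ⟨⟨c, hcs⟩, _, hgo⟩ := List.any_eq_true.mp h
        have hc1 : ((n + 1 : Nat) : Int) - 1 = (n : Int) := by push_cast; ring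
        rw [hc1] at hgo
        obtain ⟨S, hlen, hpal⟩ := (ih _).mp hgo
        exact ⟨c :: S, by simpa using hlen, by rw [pvRemoveAll_cons]; exact hpal⟩
      · rintro ⟨S, hlen, hpal⟩
        have hc1 : ((n + 1 : Nat) : Int) - 1 = (n : Int) + 1 - 1 := by push_cast; ring
        rw [hc1]
        exact aGo_back n ih S s hp hlen hpal

-- characterisation of B: some sub-sequence of `rest` of length ≤ b removed yields a palindrome
theorem altGo_iff (rest : List Char) : ∀ (s : List Char) (b : Int), 0 ≤ b →
    (pvAltGo rest s b = true ↔
      ∃ T : List Char, T.Sublist rest ∧ (T.length : Int) ≤ b ∧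
        (pvRemoveAll T s).reverse = pvRemoveAll T s) := by
  induction rest with
  | nil =>
    intro s b hb
    rw [pvAltGo]
    constructor
    · intro h
      by_cases hp : s.reverse = s
      · exact ⟨[], List.Sublist.refl _, by simpa using hb, by rw [pvRemoveAll_nil]; exact hp⟩
      · simp [hp] at h
    · rintro ⟨T, hT, _, hpal⟩
      have : T = [] := List.sublist_nil.mp hT
      subst this
      rw [pvRemoveAll_nil] at hpal
      simp [hpal]
  | cons c tl ih =>
    intro s b hb
    rw [pvAltGo]
    by_cases hp : s.reverse = s
    · simp only [if_pos hp, true_iff]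
      exact ⟨[], List.nil_sublist _, by simpa using hb, by rw [pvRemoveAll_nil]; exact hp⟩
    · simp only [if_neg hp]
      by_cases hb0 : b ≤ 0
      · rw [if_pos hb0]
        refine iff_of_false (by simp) ?_
        rintro ⟨T, _, hlen, hpal⟩
        have : T = [] := by
          have : T.length = 0 := by omega
          exact List.length_eq_zero_iff.mp this
        subst this
        rw [pvRemoveAll_nil] at hpal
        exact hp hpal
      · simp only [if_neg hb0, Bool.or_eq_true]
        have hb1 : 0 ≤ b - 1 := by omega
        constructor
        · rintro (h | h)
          · obtain ⟨T, hT, hlen, hpal⟩ := (ih _ _ hb1).mp h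
            exact ⟨c :: T, List.Sublist.cons₂ c hT, by simp only [List.length_cons]; push_cast at hlen ⊢; omega,
              by rw [pvRemoveAll_cons]; exact hpal⟩
          · obtain ⟨T, hT, hlen, hpal⟩ := (ih _ _ hb).mp h
            exact ⟨T, List.Sublist.cons c hT, hlen, hpal⟩
        · rintro ⟨T, hT, hlen, hpal⟩
          rcases List.sublist_cons_iff.mp hT with h | ⟨T', rfl, hT'⟩
          · exact Or.inr ((ih _ _ hb).mpr ⟨T, h, hlen, hpal⟩)
          · refine Or.inl ((ih _ _ hb1).mpr ⟨T', hT', ?_, ?_⟩)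
            · simp only [List.length_cons] at hlen; push_cast at hlen ⊢; omega
            · rw [pvRemoveAll_cons] at hpal; exact hpal

-- any removal list can be normalised to a sub-sequence of the distinct letters of s
theorem exists_sublist_dedup (s : List Char) (n : Nat) :
    (∃ S : List Char, S.length ≤ n ∧ (pvRemoveAll S s).reverse = pvRemoveAll S s) ↔
    (∃ T : List Char, T.Sublist (PySem.List.dedup s) ∧ (T.length : Int) ≤ (n : Int) ∧
        (pvRemoveAll T s).reverse = pvRemoveAll T s) := by
  constructor
  · rintro ⟨S, hlen, hpal⟩
    refine ⟨(PySem.List.dedup s).filter (fun a => decide (a ∈ S)), List.filter_sublist, ?_, ?_⟩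
    · have hnd : ((PySem.List.dedup s).filter (fun a => decide (a ∈ S))).Nodup :=
        (List.filter_sublist).nodup (PySem.List.nodup_dedup s)
      have hsub : ((PySem.List.dedup s).filter (fun a => decide (a ∈ S))).toFinset ⊆ S.toFinset := by
        intro a ha
        simp only [List.mem_toFinset, List.mem_filter, decide_eq_true_eq] at ha ⊢
        exact ha.2
      have h1 : ((PySem.List.dedup s).filter (fun a => decide (a ∈ S))).length ≤ S.length := by
        calc ((PySem.List.dedup s).filter (fun a => decide (a ∈ S))).length
            = ((PySem.List.dedup s).filter (fun a => decide (a ∈ S))).toFinset.card :=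
              (List.toFinset_card_of_nodup hnd).symm
          _ ≤ S.toFinset.card := Finset.card_le_card hsub
          _ ≤ S.length := S.toFinset_card_le
      exact_mod_cast le_trans h1 hlen
    · have he : pvRemoveAll ((PySem.List.dedup s).filter (fun a => decide (a ∈ S))) s
          = pvRemoveAll S s := by
        rw [pvRemoveAll_eq_filter, pvRemoveAll_eq_filter]
        apply List.filter_congr
        intro a ha
        have hd : a ∈ PySem.List.dedup s := (PySem.List.mem_dedup s a).mpr ha
        by_cases hS : a ∈ S <;> simp [hS, List.mem_filter, ha]
      rw [he]
      exact hpal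
  · rintro ⟨T, _, hlen, hpal⟩
    exact ⟨T, by exact_mod_cast hlen, hpal⟩

-- ===== VERDICT (by name: the statement is the Claim_ definition above) =====
theorem checkPalindrome_1_spec : Claim_equal_checkPalindrome_1 := by
  intro string k _ hk
  unfold Spec_checkPalindrome_1 checkPalindrome_1 checkPalindrome_1_alt
  obtain ⟨n, rfl⟩ : ∃ n : Nat, k = (n : Int) := ⟨k.toNat, (Int.toNat_of_nonneg hk).symm⟩
  rw [Bool.eq_iff_iff, aGo_iff, exists_sublist_dedup, altGo_iff _ _ _ (by positivity)]
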